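-- pv_equiv track=rewrite | github.com/speculati0n/NFL-DFS-Tools | stack_metrics.py | _count_same_team_pairs
-- ===== SOURCE A (Python) =====
-- from typing import Dict, List, Tuple, Any
-- from collections import defaultdict, Counter
--
-- def _count_same_team_pairs(a: List[Dict[str,Any]], b: List[Dict[str,Any]]) -> int:
--     team_to_a = Counter(p.get("team") for p in a)
--     team_to_b = Counter(p.get("team") for p in b)
--     total = 0
--     for t, ca in team_to_a.items():
--         if t in team_to_b:
--             total += ca * team_to_b[t]
--     return total
-- ===== SOURCE B (Python) =====
-- def _count_same_team_pairs(a, b):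
--     total = 0
--     for p in b:
--         t = p.get("team")
--         total += sum(1 for q in a if q.get("team") == t)
--     return total
-- ===== Notes on version B (the rewrite author's own statement) =====
-- stated objective: simpler
-- what changed: Replaces the two Counter tabulations and the count-product loop over counter items by a direct double loop: for each element of b, add the number of elements of a with the same team.
import Mathlib
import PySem

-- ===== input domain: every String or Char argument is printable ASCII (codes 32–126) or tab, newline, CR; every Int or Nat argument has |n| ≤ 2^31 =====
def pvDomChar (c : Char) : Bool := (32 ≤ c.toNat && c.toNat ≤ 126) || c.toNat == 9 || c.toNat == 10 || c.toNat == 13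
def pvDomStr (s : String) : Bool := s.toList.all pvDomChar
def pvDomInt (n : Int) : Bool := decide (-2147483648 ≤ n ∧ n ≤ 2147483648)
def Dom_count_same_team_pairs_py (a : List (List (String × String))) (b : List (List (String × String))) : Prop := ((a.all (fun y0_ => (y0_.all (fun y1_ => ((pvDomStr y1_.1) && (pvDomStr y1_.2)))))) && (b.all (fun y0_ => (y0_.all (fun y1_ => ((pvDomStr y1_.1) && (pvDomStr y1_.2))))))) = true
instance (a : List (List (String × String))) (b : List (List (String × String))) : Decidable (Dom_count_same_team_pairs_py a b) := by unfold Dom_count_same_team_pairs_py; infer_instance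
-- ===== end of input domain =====

-- B replaces A's two Counter tabulations by a direct double loop (one match-count per element of b); equivalence of return values is proved.

-- p.get("team"): first-match lookup in the association list (shared helper of both ports)
def teamOf (p : List (String × String)) : Option String := (PySem.Dict.mk p).get? "team"

-- ===== PORT A =====
def count_same_team_pairs_py (a : List (List (String × String))) (b : List (List (String × String))) : Int :=
  let team_to_a := PySem.Dict.counter (a.map teamOf)
  let team_to_b := PySem.Dict.counter (b.map teamOf)
  team_to_a.items.foldl
    (fun total tc => if team_to_b.contains tc.1 then total + tc.2 * team_to_b.getD tc.1 0 else total) 0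

-- ===== PORT B =====
def count_same_team_pairs_py_alt (a : List (List (String × String))) (b : List (List (String × String))) : Int :=
  b.foldl (fun total p => total + ((a.countP (fun q => teamOf q == teamOf p) : Nat) : Int)) 0

-- ===== PRECONDITION & SPEC =====
def Spec_count_same_team_pairs_py (a : List (List (String × String))) (b : List (List (String × String))) (out : Int) : Prop := out = count_same_team_pairs_py_alt a b
instance (a : List (List (String × String))) (b : List (List (String × String))) (out : Int) : Decidable (Spec_count_same_team_pairs_py a b out) := by unfold Spec_count_same_team_pairs_py; infer_instance

-- ===== CLAIM (what is proved, stated in full; the proofs are below) =====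
def Claim_equal_count_same_team_pairs_py : Prop := ∀ (a : List (List (String × String))) (b : List (List (String × String))), Dom_count_same_team_pairs_py a b → Spec_count_same_team_pairs_py a b (count_same_team_pairs_py a b)

-- ===== LEMMAS AND PROOFS =====

-- Σ_{k ∈ l} (if k = t then f k else 0) over a Nodup list picks the single term
theorem sum_map_ite_pick {α : Type} [BEq α] [LawfulBEq α] [DecidableEq α] (l : List α) (hl : l.Nodup) (t : α) (f : α → Int) :
    (l.map (fun k => if k = t then f k else 0)).sum = if t ∈ l then f t else 0 := by
  induction l with
  | nil => simp
  | cons x l ih =>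
    rcases List.nodup_cons.mp hl with ⟨hx, hl'⟩
    rw [List.map_cons, List.sum_cons, ih hl']
    by_cases hxt : x = t
    · subst hxt
      rw [if_pos rfl, if_neg hx, if_pos (List.mem_cons_self)]
      ring
    · rw [if_neg hxt]
      by_cases ht : t ∈ l
      · rw [if_pos ht, if_pos (List.mem_cons_of_mem _ ht)]
        ring
      · rw [if_neg ht, if_neg (by simp [List.mem_cons, ht]; exact fun h => hxt h.symm)]
        ring

-- the heart: Σ_{k ∈ dedup A} count_A k * count_B k = Σ_{t ∈ B} count_A t
theorem sum_dedup_count_mul {α : Type} [BEq α] [LawfulBEq α] [DecidableEq α] (A B : List α) :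
    ((PySem.List.dedup A).map (fun k => ((A.count k : Int)) * (B.count k : Int))).sum
      = (B.map (fun t => ((A.count t : Int)))).sum := by
  induction B with
  | nil => simp
  | cons t B ih =>
    have hsplit : ∀ k : α, ((A.count k : Int)) * ((t :: B).count k : Int)
        = (A.count k : Int) * (B.count k : Int) + (if k = t then (A.count k : Int) else 0) := by
      intro k
      rw [List.count_cons]
      by_cases h : k = t
      · subst h
        simp only [BEq.rfl, if_true]
        push_cast; ring
      · simp only [beq_iff_eq, if_neg h, if_neg (fun hh : t = k => h hh.symm)]
        push_cast; ring
    calc ((PySem.List.dedup A).map (fun k => ((A.count k : Int)) * ((t :: B).count k : Int))).sum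
        = ((PySem.List.dedup A).map (fun k => (A.count k : Int) * (B.count k : Int)
            + (if k = t then (A.count k : Int) else 0))).sum := by
          simp only [hsplit]
      _ = ((PySem.List.dedup A).map (fun k => (A.count k : Int) * (B.count k : Int))).sum
            + ((PySem.List.dedup A).map (fun k => if k = t then (A.count k : Int) else 0)).sum := by
          rw [← List.sum_map_add]
      _ = (B.map (fun t => ((A.count t : Int)))).sum + (A.count t : Int) := by
          rw [ih, sum_map_ite_pick _ (PySem.List.nodup_dedup A) t]
          by_cases ht : t ∈ A
          · simp [ht]
          · simp [ht, List.count_eq_zero_of_not_mem ht]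
      _ = ((t :: B).map (fun t => ((A.count t : Int)))).sum := by
          simp [List.sum_cons]; ring

-- ===== VERDICT (by name: the statement is the Claim_ definition above) =====
theorem count_same_team_pairs_py_spec : Claim_equal_count_same_team_pairs_py := by
  intro a b _
  unfold Spec_count_same_team_pairs_py count_same_team_pairs_py count_same_team_pairs_py_alt
  set A := a.map teamOf with hA
  set B := b.map teamOf with hB
  dsimp only
  -- A's fold over counter items becomes a sum over dedup A
  rw [PySem.Dict.items_counter, List.foldl_map]
  dsimp only
  rw [PySem.List.foldl_congr_mem _ _
      (fun (total : Int) (k : Option String) => total + (A.count k : Int) * (B.count k : Int)) _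
      (by
        intro acc k _
        simp only
        by_cases h : (PySem.Dict.counter B).contains k
        · rw [if_pos h, PySem.Dict.getD_counter]
        · rw [if_neg h]
          have : B.count k = 0 := by
            rw [List.count_eq_zero]
            intro hk
            exact h (by rw [PySem.Dict.contains_counter]; simpa using hk)
          simp [this])]
  rw [PySem.List.foldl_add (g := fun k => (A.count k : Int) * (B.count k : Int))]
  -- B's fold becomes the sum over b of per-element match counts
  rw [PySem.List.foldl_add (g := fun p => ((a.countP (fun q => teamOf q == teamOf p) : Nat) : Int))]
  simp only [zero_add]
  have hcnt : ∀ p, a.countP (fun q => teamOf q == teamOf p) = A.count (teamOf p) := by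
    intro p
    rw [hA, List.count_eq_countP, List.countP_map]
    rfl
  have hmain := sum_dedup_count_mul A B
  rw [PySem.List.dedup_eq_ofList] at hmain
  rw [hmain, hB, List.map_map]
  refine congrArg List.sum (List.map_congr_left ?_).symm
  intro p _
  simp only [Function.comp_apply, hcnt p]
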